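-- pv_equiv track=rewrite | github.com/ljtijhuis/aoc_2024_py | src/day12.py | calc_perimeter
-- ===== SOURCE A (Python) =====
-- def calc_perimeter(cluster):
--     total_fences = 0
--     for (row, col) in cluster:
--         if not (row+1, col) in cluster:
--             total_fences += 1
--         if not (row-1, col) in cluster:
--             total_fences += 1
--         if not (row, col+1) in cluster:
--             total_fences += 1
--         if not (row, col-1) in cluster:
--             total_fences += 1
--     return total_fences
-- ===== SOURCE B (Python) =====
-- def calc_perimeter(cluster):
--     shared = 0
--     for (row, col) in cluster:
--         if (row + 1, col) in cluster:
--             shared += 1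
--         if (row, col + 1) in cluster:
--             shared += 1
--     return 4 * len(cluster) - 2 * shared
-- ===== Notes on version B (the rewrite author's own statement) =====
-- stated objective: simpler
-- what changed: Instead of four absence checks per cell, B counts each internal edge once (checking only the down and right neighbours) and returns 4*len(cluster) - 2*shared, a closed-form relation between cell count, shared edges and perimeter.
import Mathlib
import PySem

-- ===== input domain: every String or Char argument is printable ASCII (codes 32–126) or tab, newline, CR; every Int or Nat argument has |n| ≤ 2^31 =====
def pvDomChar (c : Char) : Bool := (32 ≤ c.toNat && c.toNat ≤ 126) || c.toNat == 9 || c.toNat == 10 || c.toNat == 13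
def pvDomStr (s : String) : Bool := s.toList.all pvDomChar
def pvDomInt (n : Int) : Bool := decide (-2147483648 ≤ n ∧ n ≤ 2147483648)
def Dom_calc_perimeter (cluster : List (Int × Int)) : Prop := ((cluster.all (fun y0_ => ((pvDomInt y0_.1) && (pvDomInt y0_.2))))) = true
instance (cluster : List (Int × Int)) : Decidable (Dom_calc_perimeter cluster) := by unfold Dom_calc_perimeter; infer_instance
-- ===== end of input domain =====

-- B replaces A's four absence checks per cell by a one-directional shared-edge tally and the
-- closed form 4*n - 2*shared (simpler; equivalent for duplicate-free lists, i.e. Python sets).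


-- ===== PORT A =====
def calc_perimeter (cluster : List (Int × Int)) : Int :=
  cluster.foldl (fun total_fences p =>
    let total_fences := if (p.1 + 1, p.2) ∈ cluster then total_fences else total_fences + 1
    let total_fences := if (p.1 - 1, p.2) ∈ cluster then total_fences else total_fences + 1
    let total_fences := if (p.1, p.2 + 1) ∈ cluster then total_fences else total_fences + 1
    if (p.1, p.2 - 1) ∈ cluster then total_fences else total_fences + 1) 0

-- ===== PORT B =====
def calc_perimeter_alt (cluster : List (Int × Int)) : Int :=
  let shared := cluster.foldl (fun shared p =>
    let shared := if (p.1 + 1, p.2) ∈ cluster then shared + 1 else shared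
    if (p.1, p.2 + 1) ∈ cluster then shared + 1 else shared) 0
  4 * (cluster.length : Int) - 2 * shared

-- ===== PRECONDITION & SPEC =====
-- Pre_: the argument is a Python set, so its List representation holds distinct elements.
def Pre_calc_perimeter (cluster : List (Int × Int)) : Prop := cluster.Nodup
instance (cluster : List (Int × Int)) : Decidable (Pre_calc_perimeter cluster) := by unfold Pre_calc_perimeter; infer_instance
def pvWitness_calc_perimeter : (List (Int × Int)) := [(0, 0), (0, 1), (1, 0)]
def Spec_calc_perimeter (cluster : List (Int × Int)) (out : Int) : Prop := out = calc_perimeter_alt cluster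
instance (cluster : List (Int × Int)) (out : Int) : Decidable (Spec_calc_perimeter cluster out) := by unfold Spec_calc_perimeter; infer_instance

-- ===== CLAIM (what is proved, stated in full; the proofs are below) =====
def Claim_equal_calc_perimeter : Prop := ∀ (cluster : List (Int × Int)), Dom_calc_perimeter cluster → Pre_calc_perimeter cluster → Spec_calc_perimeter cluster (calc_perimeter cluster)

-- ===== LEMMAS AND PROOFS =====

-- an indicator sum over a list equals countP
theorem pv_sum_ite_countP (L : List (Int × Int)) (P : Int × Int → Bool) :
    (L.map (fun p => if P p then (1 : Int) else 0)).sum = (L.countP P : Int) := by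
  induction L with
  | nil => simp
  | cons a t ih =>
    simp only [List.map_cons, List.sum_cons, List.countP_cons, ih]
    split <;> simp <;> ring

-- a foldl that adds f p at each step is the sum of the f p
theorem pv_foldl_add (f : Int × Int → Int) (L : List (Int × Int)) (a : Int) :
    L.foldl (fun acc p => acc + f p) a = a + (L.map f).sum := by
  induction L generalizing a with
  | nil => simp
  | cons x t ih => simp [List.foldl_cons, ih]; ring

-- shifted-neighbour counts agree on duplicate-free lists (bijection p ↦ p + e)
theorem pv_count_shift (L : List (Int × Int)) (h : L.Nodup) (e : Int × Int) :
    L.countP (fun p => decide ((p.1 + e.1, p.2 + e.2) ∈ L)) =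
    L.countP (fun p => decide ((p.1 - e.1, p.2 - e.2) ∈ L)) := by
  have key : ∀ (P : Int × Int → Bool),
      L.countP P = (L.toFinset.filter (fun p => P p = true)).card := by
    intro P
    rw [List.countP_eq_length_filter]
    have hn : (L.filter P).Nodup := h.filter _
    rw [← List.toFinset_card_of_nodup hn, List.toFinset_filter]
  rw [key, key]
  apply Finset.card_bij' (fun p _ => (p.1 + e.1, p.2 + e.2)) (fun q _ => (q.1 - e.1, q.2 - e.2))
  · intro p hp
    simp only [Finset.mem_filter, List.mem_toFinset, decide_eq_true_eq] at hp ⊢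
    exact ⟨hp.2, by simpa using hp.1⟩
  · intro q hq
    simp only [Finset.mem_filter, List.mem_toFinset, decide_eq_true_eq] at hq ⊢
    exact ⟨hq.2, by simpa using hq.1⟩
  · intro p _; simp
  · intro q _; simp

theorem calc_perimeter_eq_sum (cluster : List (Int × Int)) :
    calc_perimeter cluster =
      (cluster.map (fun p => if decide ((p.1 + 1, p.2) ∈ cluster) = true then (0:Int) else 1)).sum
    + (cluster.map (fun p => if decide ((p.1 - 1, p.2) ∈ cluster) = true then (0:Int) else 1)).sum
    + (cluster.map (fun p => if decide ((p.1, p.2 + 1) ∈ cluster) = true then (0:Int) else 1)).sum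
    + (cluster.map (fun p => if decide ((p.1, p.2 - 1) ∈ cluster) = true then (0:Int) else 1)).sum := by
  unfold calc_perimeter
  have : (fun (total_fences : Int) (p : Int × Int) =>
    let total_fences := if (p.1 + 1, p.2) ∈ cluster then total_fences else total_fences + 1
    let total_fences := if (p.1 - 1, p.2) ∈ cluster then total_fences else total_fences + 1
    let total_fences := if (p.1, p.2 + 1) ∈ cluster then total_fences else total_fences + 1
    if (p.1, p.2 - 1) ∈ cluster then total_fences else total_fences + 1)
    = (fun acc p => acc +
        ((if decide ((p.1 + 1, p.2) ∈ cluster) = true then (0:Int) else 1)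
       + (if decide ((p.1 - 1, p.2) ∈ cluster) = true then (0:Int) else 1)
       + (if decide ((p.1, p.2 + 1) ∈ cluster) = true then (0:Int) else 1)
       + (if decide ((p.1, p.2 - 1) ∈ cluster) = true then (0:Int) else 1))) := by
    funext acc p; simp only [decide_eq_true_eq]; split_ifs <;> ring
  rw [this, pv_foldl_add]
  have hsplit : ∀ (f g : Int × Int → Int) (M : List (Int × Int)),
      (M.map (fun p => f p + g p)).sum = (M.map f).sum + (M.map g).sum := by
    intro f g M; induction M with
    | nil => simp
    | cons x t ih => simp [ih]; ring
  rw [show (fun p : Int × Int =>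
        ((if decide ((p.1 + 1, p.2) ∈ cluster) = true then (0:Int) else 1)
       + (if decide ((p.1 - 1, p.2) ∈ cluster) = true then (0:Int) else 1)
       + (if decide ((p.1, p.2 + 1) ∈ cluster) = true then (0:Int) else 1)
       + (if decide ((p.1, p.2 - 1) ∈ cluster) = true then (0:Int) else 1)))
      = (fun p : Int × Int =>
        ((if decide ((p.1 + 1, p.2) ∈ cluster) = true then (0:Int) else 1)
       + (if decide ((p.1 - 1, p.2) ∈ cluster) = true then (0:Int) else 1)
       + (if decide ((p.1, p.2 + 1) ∈ cluster) = true then (0:Int) else 1))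
       + (if decide ((p.1, p.2 - 1) ∈ cluster) = true then (0:Int) else 1)) from rfl]
  rw [hsplit]
  rw [show (fun p : Int × Int =>
        ((if decide ((p.1 + 1, p.2) ∈ cluster) = true then (0:Int) else 1)
       + (if decide ((p.1 - 1, p.2) ∈ cluster) = true then (0:Int) else 1)
       + (if decide ((p.1, p.2 + 1) ∈ cluster) = true then (0:Int) else 1)))
      = (fun p : Int × Int =>
        ((if decide ((p.1 + 1, p.2) ∈ cluster) = true then (0:Int) else 1)
       + (if decide ((p.1 - 1, p.2) ∈ cluster) = true then (0:Int) else 1))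
       + (if decide ((p.1, p.2 + 1) ∈ cluster) = true then (0:Int) else 1)) from rfl]
  rw [hsplit, hsplit]
  ring

theorem calc_perimeter_alt_eq_sum (cluster : List (Int × Int)) :
    calc_perimeter_alt cluster = 4 * (cluster.length : Int)
      - 2 * ((cluster.map (fun p => if decide ((p.1 + 1, p.2) ∈ cluster) = true then (1:Int) else 0)).sum
           + (cluster.map (fun p => if decide ((p.1, p.2 + 1) ∈ cluster) = true then (1:Int) else 0)).sum) := by
  unfold calc_perimeter_alt
  have : (fun (shared : Int) (p : Int × Int) =>
      let shared := if (p.1 + 1, p.2) ∈ cluster then shared + 1 else shared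
      if (p.1, p.2 + 1) ∈ cluster then shared + 1 else shared)
    = (fun acc p => acc +
        ((if decide ((p.1 + 1, p.2) ∈ cluster) = true then (1:Int) else 0)
       + (if decide ((p.1, p.2 + 1) ∈ cluster) = true then (1:Int) else 0))) := by
    funext acc p; simp only [decide_eq_true_eq]; split_ifs <;> ring
  rw [this, pv_foldl_add]
  have hsplit : ∀ (f g : Int × Int → Int) (M : List (Int × Int)),
      (M.map (fun p => f p + g p)).sum = (M.map f).sum + (M.map g).sum := by
    intro f g M; induction M with
    | nil => simp
    | cons x t ih => simp [ih]; ring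
  rw [show (fun p : Int × Int =>
        ((if decide ((p.1 + 1, p.2) ∈ cluster) = true then (1:Int) else 0)
       + (if decide ((p.1, p.2 + 1) ∈ cluster) = true then (1:Int) else 0)))
      = (fun p : Int × Int =>
        (if decide ((p.1 + 1, p.2) ∈ cluster) = true then (1:Int) else 0)
       + (if decide ((p.1, p.2 + 1) ∈ cluster) = true then (1:Int) else 0)) from rfl]
  rw [hsplit]
  ring

-- an absence-indicator sum is length minus the presence count
theorem pv_absent_sum (L : List (Int × Int)) (P : Int × Int → Bool) :
    (L.map (fun p => if P p then (0:Int) else 1)).sum = (L.length : Int) - (L.countP P : Int) := by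
  induction L with
  | nil => simp
  | cons a t ih =>
    simp only [List.map_cons, List.sum_cons, List.countP_cons, List.length_cons, ih]
    split <;> simp <;> ring

-- ===== VERDICT (by name: the statement is the Claim_ definition above) =====
theorem calc_perimeter_spec : Claim_equal_calc_perimeter := by
  intro cluster _ hpre
  unfold Spec_calc_perimeter
  rw [calc_perimeter_eq_sum, calc_perimeter_alt_eq_sum]
  rw [pv_absent_sum, pv_absent_sum, pv_absent_sum, pv_absent_sum]
  rw [pv_sum_ite_countP, pv_sum_ite_countP]
  have h1 := pv_count_shift cluster hpre (1, 0)
  have h2 := pv_count_shift cluster hpre (0, 1)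
  simp only [add_zero, sub_zero] at h1 h2
  rw [h1, h2]
  ring
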